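-- pv_equiv track=rewrite | github.com/AlexLagin/BP | skuska.py | leads_leftmost_to_A
-- ===== SOURCE A (Python) =====
-- def leads_leftmost_to_A(current, target, grammar, visited=None):
--     """
--     Zistí, či z neterminálu 'current' existuje (ľavmostná) derivácia,
--     ktorej prvý symbol je 'target'.
--
--     T. j. hľadáme, či existuje nejaké pravidlo current -> targetγ
--     alebo current -> Xγ s X isupper() a rekurzívne leads_leftmost_to_A(X, target, ...)
--     """
--     if visited is None:
--         visited = set()
--
--     # Ak sme tento neterminál už spracovali, vrátime False (vyhneme sa cyklu).
--     if current in visited: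
--         return False
--     visited.add(current)
--
--     # Pre každú produkciu current -> p
--     for p in grammar.get(current, []):
--         if not p:
--             continue
--         first_sym = p[0]
--         # Ak prvý symbol p je rovnaký ako target, našli sme odvodenie
--         if first_sym == target:
--             return True
--         # Ak je to neterminál a nie je to target, skúmame rekurzívne
--         if first_sym.isupper() and first_sym != target:
--             if leads_leftmost_to_A(first_sym, target, grammar, visited.copy()):
--                 return True
--
--     return False
-- ===== SOURCE B (Python) =====
-- def leads_leftmost_to_A(current, target, grammar, visited=None):
--     """Bottom-up saturation instead of branch-copied recursive search.
--
--     Computes once, in at most len(grammar) saturation rounds (stopping at a fixed point), the set `lead` of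
--     nonterminals (outside `visited`) from which a leftmost derivation
--     reaches a sentential form starting with `target`, then answers for
--     `current` by a single scan of its productions.
--     Return value only: unlike A, this does not add `current` to a
--     caller-supplied `visited` set.
--     """
--     if visited is None:
--         visited = set()
--     lead = set()
--     for _ in range(len(grammar)):
--         before = len(lead)
--         for lhs in grammar:
--             if lhs in lead or lhs in visited:
--                 continue
--             for p in grammar[lhs]:
--                 if p and (p[0] == target or (p[0].isupper() and p[0] in lead)):
--                     lead.add(lhs)
--                     break
--         if len(lead) == before:
--             break
--     if current in visited:
--         return False
--     for p in grammar.get(current, []):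
--         if p and (p[0] == target or (p[0].isupper() and p[0] in lead)):
--             return True
--     return False
-- ===== Notes on version B (the rewrite author's own statement) =====
-- stated objective: alternative
-- what changed: Replaces A's top-down recursive search with a branch-copied visited set (visited.copy() per recursive call, worst-case exponential on cyclic grammars) by a bottom-up fixed-point saturation: rounds over the grammar build the set of nonterminals that lead to target (stopping at a fixed point, at most len(grammar) rounds), then current is answered by one scan of its productions.
import Mathlib
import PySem

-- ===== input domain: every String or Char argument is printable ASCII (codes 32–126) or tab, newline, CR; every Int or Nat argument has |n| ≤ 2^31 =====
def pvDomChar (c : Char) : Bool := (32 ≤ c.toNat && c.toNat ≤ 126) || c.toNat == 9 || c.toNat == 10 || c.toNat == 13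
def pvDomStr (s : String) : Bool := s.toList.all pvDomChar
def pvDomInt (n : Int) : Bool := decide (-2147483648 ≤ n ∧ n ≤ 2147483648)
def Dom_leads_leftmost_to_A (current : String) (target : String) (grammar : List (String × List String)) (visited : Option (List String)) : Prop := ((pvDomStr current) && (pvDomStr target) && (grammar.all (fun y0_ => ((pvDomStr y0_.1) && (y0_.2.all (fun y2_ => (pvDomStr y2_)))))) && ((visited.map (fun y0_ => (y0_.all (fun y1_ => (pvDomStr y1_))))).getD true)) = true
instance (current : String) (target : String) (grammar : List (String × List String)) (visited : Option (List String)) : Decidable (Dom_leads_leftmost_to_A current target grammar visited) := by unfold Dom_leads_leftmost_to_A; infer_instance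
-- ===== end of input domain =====

-- B replaces A's branch-copied recursive search (visited.copy() per call, exponential on cyclic
-- grammars) by a bottom-up fixed-point saturation over the grammar, answering current in one scan.
-- Return-value equivalence only: Python A adds `current` to a caller-supplied visited set, B does not.

-- ===== PORT A =====
-- A-side helpers: the production pool and first-symbol pool, used by the termination measure
def pvAllProds (g : List (String × List String)) : List String := g.flatMap (fun kv => kv.2)

def pvFirst? (p : String) : Option Char := PySem.Str.pyGet? p 0   -- p[0] (none = p empty)

def pvFirstsA (g : List (String × List String)) : Finset String :=
  ((pvAllProds g).filterMap (fun p => (pvFirst? p).map (fun c => String.ofList [c]))).toFinset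

-- the looked-up production list is drawn from the grammar's pool (cited by the termination proof)
lemma pv_getD_subset (g : List (String × List String)) (x : String) :
    ∀ p ∈ (PySem.Dict.mk g).getD x [], p ∈ pvAllProds g := by
  induction g with
  | nil => intro p hp; simp [PySem.Dict.getD, PySem.Dict.get?] at hp
  | cons kv rest ih =>
    intro p hp
    rw [PySem.Dict.getD_eq_get?_getD] at hp
    rw [show (PySem.Dict.mk (kv :: rest)) = PySem.Dict.mk ((kv.1, kv.2) :: rest) by rfl] at hp
    rw [PySem.Dict.get?_mk_cons] at hp
    by_cases h : kv.1 == x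
    · simp [h] at hp
      simp [pvAllProds]
      exact Or.inl hp
    · simp [h] at hp
      have := ih p (by rw [PySem.Dict.getD_eq_get?_getD]; exact hp)
      simp [pvAllProds] at this ⊢
      exact Or.inr this

lemma pv_first_mem (g : List (String × List String)) {p : String} {c : Char}
    (hp : p ∈ pvAllProds g) (h : pvFirst? p = some c) : String.ofList [c] ∈ pvFirstsA g := by
  simp [pvFirstsA, List.mem_filterMap]
  exact ⟨p, hp, by simp [h]⟩

lemma pv_toFinset_add (v : PySem.Set String) (x : String) :
    (PySem.Set.add v x).toFinset = insert x v.toFinset := by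
  by_cases h : x ∈ v
  · simp [PySem.Set.add, h]
  · simp [PySem.Set.add, h]

lemma pv_not_mem_of_contains_false {v : PySem.Set String} {x : String}
    (h : ¬ PySem.Set.contains v x = true) : x ∉ v := fun hm => h ((PySem.Set.contains_iff v x).2 hm)

-- measure decrease cited by the termination proofs and the proofs below
lemma pv_meas_lt0 (g : List (String × List String)) {cur : String} {v : Finset String}
    (hcur : cur ∉ v) :
    ((pvFirstsA g) \ (insert cur v)).card < ((insert cur (pvFirstsA g)) \ v).card := by
  refine Finset.card_lt_card ?_
  constructor
  · intro y hy
    simp [Finset.mem_sdiff] at hy ⊢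
    exact ⟨Or.inr hy.1, hy.2.2⟩
  · intro hsub
    have : cur ∈ (pvFirstsA g \ (insert cur v)) := by
      apply hsub; simp [Finset.mem_sdiff, hcur]
    simp at this

-- Port of A: literal transliteration of the Python (visited.copy() = passing the immutable set value)
mutual
def pvLeadsA (g : List (String × List String)) (t : String) (cur : String) (v : PySem.Set String) : Bool :=
  if h : PySem.Set.contains v cur then false
  else pvLeadsAProds g t (PySem.Set.add v cur) ((PySem.Dict.mk g).getD cur []) (pv_getD_subset g cur)
termination_by (((insert cur (pvFirstsA g)) \ v.toFinset).card, 0, 0)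
decreasing_by
  refine Prod.Lex.left _ _ ?_
  rw [pv_toFinset_add]
  have hx : cur ∉ v.toFinset := by
    simpa using pv_not_mem_of_contains_false h
  exact pv_meas_lt0 g hx

def pvLeadsAProds (g : List (String × List String)) (t : String) (v : PySem.Set String)
    (ps : List String) (hps : ∀ p ∈ ps, p ∈ pvAllProds g) : Bool :=
  match ps with
  | [] => false
  | p :: rest =>
    match hfs : pvFirst? p with
    | none => pvLeadsAProds g t v rest (fun q hq => hps q (List.mem_cons_of_mem _ hq))
    | some c =>
      if String.ofList [c] = t then true
      else if PySem.Chars.isupper c && !(String.ofList [c] == t) then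
        (pvLeadsA g t (String.ofList [c]) v) || pvLeadsAProds g t v rest (fun q hq => hps q (List.mem_cons_of_mem _ hq))
      else pvLeadsAProds g t v rest (fun q hq => hps q (List.mem_cons_of_mem _ hq))
termination_by (((pvFirstsA g) \ v.toFinset).card, 1, ps.length)
decreasing_by
  · exact Prod.Lex.right _ (Prod.Lex.right _ (by simp))
  · have hf : String.ofList [c] ∈ pvFirstsA g := pv_first_mem g (hps p (by simp)) hfs
    have : insert (String.ofList [c]) (pvFirstsA g) = pvFirstsA g := Finset.insert_eq_self.2 hf
    rw [this]
    exact Prod.Lex.right _ (Prod.Lex.left _ _ (by omega))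
  · exact Prod.Lex.right _ (Prod.Lex.right _ (by simp))
  · exact Prod.Lex.right _ (Prod.Lex.right _ (by simp))
end

def leads_leftmost_to_A (current : String) (target : String) (grammar : List (String × List String)) (visited : Option (List String)) : Bool :=
  let v : PySem.Set String := match visited with
    | none => PySem.Set.empty
    | some l => PySem.Set.ofList l
  pvLeadsA grammar target current v

-- ===== PORT B =====
def pvQual (t : String) (L : PySem.Set String) (p : String) : Bool :=
  match pvFirst? p with
  | none => false
  | some c => (String.ofList [c] == t) || (PySem.Chars.isupper c && PySem.Set.contains L (String.ofList [c]))

def pvRoundStep (g : List (String × List String)) (t : String) (v : PySem.Set String)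
    (L : PySem.Set String) (kv : String × List String) : PySem.Set String :=
  if PySem.Set.contains L kv.1 || PySem.Set.contains v kv.1 then L
  else if ((PySem.Dict.mk g).getD kv.1 []).any (pvQual t L) then PySem.Set.add L kv.1 else L

def pvRound (g : List (String × List String)) (t : String) (v L : PySem.Set String) : PySem.Set String :=
  g.foldl (pvRoundStep g t v) L

-- the round loop with the fixed-point early exit ('if len(lead) == before: break')
def pvSat (g : List (String × List String)) (t : String) (v : PySem.Set String) :
    Nat → PySem.Set String → PySem.Set String
  | 0, L => L
  | n + 1, L =>
    let L' := pvRound g t v L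
    if L'.length = L.length then L' else pvSat g t v n L'

def leads_leftmost_to_A_alt (current : String) (target : String) (grammar : List (String × List String)) (visited : Option (List String)) : Bool :=
  let v : PySem.Set String := match visited with
    | none => PySem.Set.empty
    | some l => PySem.Set.ofList l
  let lead := pvSat grammar target v grammar.length PySem.Set.empty
  if PySem.Set.contains v current then false
  else ((PySem.Dict.mk grammar).getD current []).any (pvQual target lead)

-- ===== PRECONDITION & SPEC =====
def Spec_leads_leftmost_to_A (current : String) (target : String) (grammar : List (String × List String)) (visited : Option (List String)) (out : Bool) : Prop := out = leads_leftmost_to_A_alt current target grammar visited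
instance (current : String) (target : String) (grammar : List (String × List String)) (visited : Option (List String)) (out : Bool) : Decidable (Spec_leads_leftmost_to_A current target grammar visited out) := by unfold Spec_leads_leftmost_to_A; infer_instance

-- ===== CLAIM (what is proved, stated in full; the proofs are below) =====
def Claim_equal_leads_leftmost_to_A : Prop := ∀ (current : String) (target : String) (grammar : List (String × List String)) (visited : Option (List String)), Dom_leads_leftmost_to_A current target grammar visited → Spec_leads_leftmost_to_A current target grammar visited (leads_leftmost_to_A current target grammar visited)

-- ===== LEMMAS AND PROOFS =====

lemma pv_meas_lt (g : List (String × List String)) {cur f : String} {v : Finset String}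
    (hcur : cur ∉ v) (hf : f ∈ pvFirstsA g) :
    ((insert f (pvFirstsA g)) \ (insert cur v)).card < ((insert cur (pvFirstsA g)) \ v).card := by
  rw [Finset.insert_eq_self.2 hf]
  exact pv_meas_lt0 g hcur

lemma pvQual_none {t : String} {L : PySem.Set String} {p : String}
    (h : pvFirst? p = none) : pvQual t L p = false := by
  unfold pvQual; rw [h]

lemma pvQual_some {t : String} {L : PySem.Set String} {p : String} {c : Char}
    (h : pvFirst? p = some c) :
    pvQual t L p = ((String.ofList [c] == t) ||
      (PySem.Chars.isupper c && PySem.Set.contains L (String.ofList [c]))) := by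
  unfold pvQual; rw [h]

-- the success and edge relations both programs are about
def pvSucc (g : List (String × List String)) (t : String) (n : String) : Prop :=
  ∃ p ∈ (PySem.Dict.mk g).getD n [], ∃ c, pvFirst? p = some c ∧ String.ofList [c] = t

def pvEdge (g : List (String × List String)) (t : String) (n f : String) : Prop :=
  ∃ p ∈ (PySem.Dict.mk g).getD n [], ∃ c, pvFirst? p = some c ∧ String.ofList [c] = f ∧
    PySem.Chars.isupper c = true ∧ f ≠ t

-- A's search relation: avoid set grows along the branch (visited.copy())
inductive pvGoodA (g : List (String × List String)) (t : String) : Finset String → String → Prop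
  | found (v : Finset String) (n : String) : n ∉ v → pvSucc g t n → pvGoodA g t v n
  | step (v : Finset String) (n f : String) : n ∉ v → pvEdge g t n f →
      pvGoodA g t (insert n v) f → pvGoodA g t v n

-- the same relation with a FIXED avoid set ("a derivation avoiding v exists")
inductive pvGoodP (g : List (String × List String)) (t : String) : Finset String → String → Prop
  | found (v : Finset String) (n : String) : n ∉ v → pvSucc g t n → pvGoodP g t v n
  | step (v : Finset String) (n f : String) : n ∉ v → pvEdge g t n f →
      pvGoodP g t v f → pvGoodP g t v n

theorem pvLeadsAProds_iff (g : List (String × List String)) (t : String) (v : PySem.Set String)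
    (ps : List String) :
    ∀ (hps : ∀ p ∈ ps, p ∈ pvAllProds g),
    pvLeadsAProds g t v ps hps = true ↔
      ∃ p ∈ ps, ∃ c, pvFirst? p = some c ∧
        (String.ofList [c] = t ∨ (PySem.Chars.isupper c = true ∧
          pvLeadsA g t (String.ofList [c]) v = true)) := by
  induction ps with
  | nil => intro hps; simp [pvLeadsAProds]
  | cons p rest ih =>
    intro hps
    rw [pvLeadsAProds]
    rcases hfs : pvFirst? p with _ | c
    · simp only [hfs]
      rw [ih]
      constructor
      · rintro ⟨q, hq, hrest⟩
        exact ⟨q, List.mem_cons_of_mem _ hq, hrest⟩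
      · rintro ⟨q, hq, c, hc, hrest⟩
        rcases List.mem_cons.1 hq with rfl | hq'
        · rw [hfs] at hc; cases hc
        · exact ⟨q, hq', c, hc, hrest⟩
    · simp only [hfs]
      by_cases h1 : String.ofList [c] = t
      · simp only [if_pos h1, true_iff]
        exact ⟨p, List.mem_cons_self .., c, hfs, Or.inl h1⟩
      · rw [if_neg h1]
        have hbt : (!(String.ofList [c] == t)) = true := by
          simp [h1]
        by_cases h2 : PySem.Chars.isupper c = true
        · rw [if_pos (by rw [h2, hbt]; rfl)]
          rw [Bool.or_eq_true, ih]
          constructor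
          · rintro (hl | ⟨q, hq, d, hd, hrest⟩)
            · exact ⟨p, List.mem_cons_self .., c, hfs, Or.inr ⟨h2, hl⟩⟩
            · exact ⟨q, List.mem_cons_of_mem _ hq, d, hd, hrest⟩
          · rintro ⟨q, hq, d, hd, hrest⟩
            rcases List.mem_cons.1 hq with rfl | hq'
            · rw [hfs] at hd; cases hd
              rcases hrest with h | ⟨_, hl⟩
              · exact absurd h h1
              · exact Or.inl hl
            · exact Or.inr ⟨q, hq', d, hd, hrest⟩
        · rw [if_neg (by simp [h2])]
          rw [ih]
          constructor
          · rintro ⟨q, hq, d, hd, hrest⟩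
            exact ⟨q, List.mem_cons_of_mem _ hq, d, hd, hrest⟩
          · rintro ⟨q, hq, d, hd, hrest⟩
            rcases List.mem_cons.1 hq with rfl | hq'
            · rw [hfs] at hd; cases hd
              rcases hrest with h | ⟨hu, _⟩
              · exact absurd h h1
              · exact absurd hu h2
            · exact ⟨q, hq', d, hd, hrest⟩

lemma pv_contains_eq_false {v : PySem.Set String} {x : String}
    (h : x ∉ v) : PySem.Set.contains v x = false := by
  cases hc : PySem.Set.contains v x
  · rfl
  · exact absurd ((PySem.Set.contains_iff v x).1 hc) h

theorem pvLeadsA_iff_goodA_aux (g : List (String × List String)) (t : String) :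
    ∀ (N : Nat) (cur : String) (v : PySem.Set String),
      ((insert cur (pvFirstsA g)) \ v.toFinset).card ≤ N →
      (pvLeadsA g t cur v = true ↔ pvGoodA g t v.toFinset cur) := by
  intro N
  induction N with
  | zero =>
    intro cur v hN
    by_cases hcv : cur ∈ v
    · rw [pvLeadsA, dif_pos ((PySem.Set.contains_iff v cur).2 hcv)]
      simp only [Bool.false_eq_true, false_iff]
      intro h
      cases h with
      | found _ _ h1 _ => exact h1 (List.mem_toFinset.2 hcv)
      | step _ _ _ h1 _ _ => exact h1 (List.mem_toFinset.2 hcv)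
    · exfalso
      have : cur ∈ (insert cur (pvFirstsA g)) \ v.toFinset := by
        simp [Finset.mem_sdiff, hcv]
      have := Finset.card_pos.2 ⟨cur, this⟩
      omega
  | succ N ihN =>
    intro cur v hN
    by_cases hcv : cur ∈ v
    · rw [pvLeadsA, dif_pos ((PySem.Set.contains_iff v cur).2 hcv)]
      simp only [Bool.false_eq_true, false_iff]
      intro h
      cases h with
      | found _ _ h1 _ => exact h1 (List.mem_toFinset.2 hcv)
      | step _ _ _ h1 _ _ => exact h1 (List.mem_toFinset.2 hcv)
    · have hcf : cur ∉ v.toFinset := fun h => hcv (List.mem_toFinset.1 h)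
      rw [pvLeadsA, dif_neg (by rw [pv_contains_eq_false hcv]; simp)]
      rw [pvLeadsAProds_iff]
      constructor
      · rintro ⟨p, hp, c, hc, hrest⟩
        rcases hrest with h1 | ⟨hu, hrec⟩
        · exact pvGoodA.found _ _ hcf ⟨p, hp, c, hc, h1⟩
        · by_cases h1 : String.ofList [c] = t
          · exact pvGoodA.found _ _ hcf ⟨p, hp, c, hc, h1⟩
          · have hf : String.ofList [c] ∈ pvFirstsA g :=
              pv_first_mem g (pv_getD_subset g cur p hp) hc
            have hmeas : ((insert (String.ofList [c]) (pvFirstsA g)) \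
                (PySem.Set.add v cur).toFinset).card ≤ N := by
              rw [pv_toFinset_add]
              have := pv_meas_lt g hcf hf
              omega
            have hg := (ihN _ _ hmeas).1 hrec
            rw [pv_toFinset_add] at hg
            exact pvGoodA.step _ _ _ hcf ⟨p, hp, c, hc, rfl, hu, h1⟩ hg
      · intro h
        cases h with
        | found _ _ h1 h2 =>
          rcases h2 with ⟨p, hp, c, hc, hct⟩
          exact ⟨p, hp, c, hc, Or.inl hct⟩
        | step _ _ f h1 h2 h3 =>
          rcases h2 with ⟨p, hp, c, hc, hcf2, hu, hft⟩
          refine ⟨p, hp, c, hc, Or.inr ⟨hu, ?_⟩⟩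
          have hf : String.ofList [c] ∈ pvFirstsA g :=
            pv_first_mem g (pv_getD_subset g cur p hp) hc
          have hmeas : ((insert (String.ofList [c]) (pvFirstsA g)) \
              (PySem.Set.add v cur).toFinset).card ≤ N := by
            rw [pv_toFinset_add]
            have := pv_meas_lt g hcf hf
            omega
          refine (ihN _ _ hmeas).2 ?_
          rw [pv_toFinset_add]
          rw [hcf2]
          exact h3

theorem pvLeadsA_iff_goodA (g : List (String × List String)) (t : String) :
    ∀ (cur : String) (v : PySem.Set String),
      pvLeadsA g t cur v = true ↔ pvGoodA g t v.toFinset cur := by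
  intro cur v
  exact pvLeadsA_iff_goodA_aux g t _ cur v le_rfl

theorem pvGoodP_mono (g : List (String × List String)) (t : String) {v v' : Finset String} {n : String}
    (h : pvGoodP g t v' n) (hsub : v ⊆ v') : pvGoodP g t v n := by
  induction h generalizing v with
  | found w h1 h2 => exact pvGoodP.found _ _ (fun hm => h1 (hsub hm)) h2
  | step w f h1 h2 _ ih =>
    exact pvGoodP.step _ _ _ (fun hm => h1 (hsub hm)) h2 (ih hsub)

theorem pvGoodA_to_goodP (g : List (String × List String)) (t : String) {v : Finset String} {n : String}
    (h : pvGoodA g t v n) : pvGoodP g t v n := by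
  induction h with
  | found w m h1 h2 => exact pvGoodP.found _ _ h1 h2
  | step w m f h1 h2 _ ih =>
    exact pvGoodP.step _ _ _ h1 h2 (pvGoodP_mono g t ih (Finset.subset_insert _ _))

theorem pvGoodP_reroute (g : List (String × List String)) (t : String) (v : Finset String) (n : String) :
    ∀ m, pvGoodP g t v m →
      pvGoodP g t (insert n v) m ∨
      (n ∉ v ∧ (pvSucc g t n ∨ ∃ f, pvEdge g t n f ∧ pvGoodP g t (insert n v) f)) := by
  intro m h
  induction h with
  | found w h1 h2 =>
    by_cases hwn : w = n
    · subst hwn; exact Or.inr ⟨h1, Or.inl h2⟩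
    · exact Or.inl (pvGoodP.found _ _ (by simp [Finset.mem_insert, hwn, h1]) h2)
  | step w f h1 h2 _ ih =>
    rcases ih with hgf | hq
    · by_cases hwn : w = n
      · subst hwn; exact Or.inr ⟨h1, Or.inr ⟨f, h2, hgf⟩⟩
      · exact Or.inl (pvGoodP.step _ _ _ (by simp [Finset.mem_insert, hwn, h1]) h2 hgf)
    · exact Or.inr hq

theorem pvEdge_first (g : List (String × List String)) (t : String) {n f : String}
    (h : pvEdge g t n f) : f ∈ pvFirstsA g := by
  rcases h with ⟨p, hp, c, hc, hcf, _, _⟩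
  rw [← hcf]
  exact pv_first_mem g (pv_getD_subset g n p hp) hc

theorem pvGoodP_to_goodA_aux (g : List (String × List String)) (t : String) :
    ∀ (N : Nat) (v : Finset String) (n : String),
      ((insert n (pvFirstsA g)) \ v).card ≤ N → pvGoodP g t v n → pvGoodA g t v n := by
  intro N
  induction N with
  | zero =>
    intro v n hN h
    exfalso
    have hnv : n ∉ v := by cases h with
      | found _ h1 _ => exact h1
      | step _ _ h1 _ _ => exact h1
    have : n ∈ (insert n (pvFirstsA g)) \ v := by simp [Finset.mem_sdiff, hnv]
    have := Finset.card_pos.2 ⟨n, this⟩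
    omega
  | succ N ihN =>
    intro v n hN h
    rcases pvGoodP_reroute g t v n n h with hbad | ⟨hnv, hq⟩
    · exfalso
      cases hbad with
      | found _ h1 _ => exact h1 (Finset.mem_insert_self _ _)
      | step _ _ h1 _ _ => exact h1 (Finset.mem_insert_self _ _)
    · rcases hq with hs | ⟨f, he, hgf⟩
      · exact pvGoodA.found _ _ hnv hs
      · have hmeas : ((insert f (pvFirstsA g)) \ (insert n v)).card ≤ N := by
          have := pv_meas_lt g hnv (pvEdge_first g t he)
          omega
        exact pvGoodA.step _ _ _ hnv he (ihN _ _ hmeas hgf)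

theorem pvGoodP_to_goodA (g : List (String × List String)) (t : String) :
    ∀ (v : Finset String) (n : String), pvGoodP g t v n → pvGoodA g t v n := by
  intro v n
  exact pvGoodP_to_goodA_aux g t _ v n le_rfl

-- ===== B-side lemmas =====

def pvRk (g : List (String × List String)) (t : String) (v : PySem.Set String) : Nat → PySem.Set String
  | 0 => PySem.Set.empty
  | n + 1 => pvRound g t v (pvRk g t v n)

lemma pv_add_append (L : PySem.Set String) (x : String) :
    ∃ ext, PySem.Set.add L x = L ++ ext := by
  unfold PySem.Set.add
  split_ifs
  · exact ⟨[], by simp⟩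
  · exact ⟨[x], rfl⟩

lemma pvRoundStep_append (g : List (String × List String)) (t : String) (v : PySem.Set String)
    (L : PySem.Set String) (kv : String × List String) :
    ∃ ext, pvRoundStep g t v L kv = L ++ ext := by
  unfold pvRoundStep
  split_ifs
  · exact ⟨[], by simp⟩
  · exact pv_add_append L kv.1
  · exact ⟨[], by simp⟩

lemma pvFold_append (g : List (String × List String)) (t : String) (v : PySem.Set String) :
    ∀ (l : List (String × List String)) (L : PySem.Set String),
      ∃ ext, l.foldl (pvRoundStep g t v) L = L ++ ext := by
  intro l
  induction l with
  | nil => exact fun L => ⟨[], by simp⟩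
  | cons kv l ih =>
    intro L
    rcases pvRoundStep_append g t v L kv with ⟨e1, he1⟩
    rcases ih (pvRoundStep g t v L kv) with ⟨e2, he2⟩
    refine ⟨e1 ++ e2, ?_⟩
    rw [List.foldl_cons, he2, he1, List.append_assoc]

lemma pvRound_fix_of_len (g : List (String × List String)) (t : String) (v : PySem.Set String)
    (L : PySem.Set String) (h : (pvRound g t v L).length = L.length) :
    pvRound g t v L = L := by
  rcases pvFold_append g t v g L with ⟨ext, he⟩
  unfold pvRound at h ⊢
  rw [he] at h ⊢
  rw [List.length_append] at h
  have : ext = [] := List.eq_nil_of_length_eq_zero (by omega)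
  simp [this]

def pvRkFrom (g : List (String × List String)) (t : String) (v : PySem.Set String) :
    Nat → PySem.Set String → PySem.Set String
  | 0, L => L
  | n + 1, L => pvRkFrom g t v n (pvRound g t v L)

lemma pvRkFrom_fix (g : List (String × List String)) (t : String) (v : PySem.Set String)
    {L : PySem.Set String} (h : pvRound g t v L = L) :
    ∀ n, pvRkFrom g t v n L = L := by
  intro n
  induction n with
  | zero => rfl
  | succ n ih => show pvRkFrom g t v n (pvRound g t v L) = L; rw [h]; exact ih

lemma pvSat_eq_rkFrom (g : List (String × List String)) (t : String) (v : PySem.Set String) :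
    ∀ (n : Nat) (L : PySem.Set String), pvSat g t v n L = pvRkFrom g t v n L := by
  intro n
  induction n with
  | zero => intro L; rfl
  | succ n ih =>
    intro L
    show (let L' := pvRound g t v L;
      if L'.length = L.length then L' else pvSat g t v n L') = pvRkFrom g t v n (pvRound g t v L)
    by_cases hl : (pvRound g t v L).length = L.length
    · have hf := pvRound_fix_of_len g t v L hl
      simp only [if_pos hl]
      rw [hf, pvRkFrom_fix g t v hf n]
    · simp only [if_neg hl]
      exact ih (pvRound g t v L)

lemma pvRkFrom_comm (g : List (String × List String)) (t : String) (v : PySem.Set String) :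
    ∀ (n : Nat) (L : PySem.Set String),
      pvRkFrom g t v n (pvRound g t v L) = pvRound g t v (pvRkFrom g t v n L) := by
  intro n
  induction n with
  | zero => intro L; rfl
  | succ n ih =>
    intro L
    show pvRkFrom g t v n (pvRound g t v (pvRound g t v L)) =
      pvRound g t v (pvRkFrom g t v n (pvRound g t v L))
    exact ih (pvRound g t v L)

lemma pvSat_empty_eq_rk (g : List (String × List String)) (t : String) (v : PySem.Set String) :
    ∀ n, pvSat g t v n PySem.Set.empty = pvRk g t v n := by
  intro n
  rw [pvSat_eq_rkFrom]
  induction n with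
  | zero => rfl
  | succ n ih =>
    show pvRkFrom g t v n (pvRound g t v PySem.Set.empty) = pvRk g t v (n + 1)
    rw [pvRkFrom_comm, ih]
    rfl

theorem pv_key_pair (g : List (String × List String)) {x : String} {l : List String}
    (h : (PySem.Dict.mk g).get? x = some l) : (x, l) ∈ g := by
  induction g with
  | nil => simp [PySem.Dict.get?] at h
  | cons kv rest ih =>
    rw [show (PySem.Dict.mk (kv :: rest)) = PySem.Dict.mk ((kv.1, kv.2) :: rest) by rfl] at h
    rw [PySem.Dict.get?_mk_cons] at h
    by_cases hk : kv.1 == x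
    · rw [if_pos hk] at h
      cases h
      have : kv.1 = x := by simpa using hk
      subst this
      exact List.mem_cons_self ..
    · rw [if_neg hk] at h
      exact List.mem_cons_of_mem _ (ih h)

theorem pv_getD_pair (g : List (String × List String)) {x p : String}
    (h : p ∈ (PySem.Dict.mk g).getD x []) : ∃ l, (x, l) ∈ g ∧ p ∈ l := by
  rw [PySem.Dict.getD_eq_get?_getD] at h
  cases hq : (PySem.Dict.mk g).get? x with
  | none => rw [hq] at h; simp at h
  | some l =>
    rw [hq] at h
    exact ⟨l, pv_key_pair g hq, h⟩

theorem pvQual_mono (t : String) {L L' : PySem.Set String} {p : String}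
    (hsub : ∀ y, y ∈ L → y ∈ L') (h : pvQual t L p = true) : pvQual t L' p = true := by
  rcases hfs : pvFirst? p with _ | c
  · rw [pvQual_none hfs] at h; cases h
  · rw [pvQual_some hfs] at h ⊢
    rw [Bool.or_eq_true] at h
    rcases h with h1 | h2
    · rw [h1]; rfl
    · rw [Bool.and_eq_true] at h2
      rcases h2 with ⟨hu, hc⟩
      have : PySem.Set.contains L' (String.ofList [c]) = true :=
        (PySem.Set.contains_iff _ _).2 (hsub _ ((PySem.Set.contains_iff _ _).1 hc))
      rw [hu, this]
      simp

theorem pvRoundStep_grow (g : List (String × List String)) (t : String) (v L : PySem.Set String)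
    (kv : String × List String) : ∀ y ∈ L, y ∈ pvRoundStep g t v L kv := by
  intro y hy
  unfold pvRoundStep
  split_ifs with h1 h2
  · exact hy
  · exact (PySem.Set.mem_add _ _ _).2 (Or.inl hy)
  · exact hy

theorem pvFold_grow (g : List (String × List String)) (t : String) (v : PySem.Set String)
    (l : List (String × List String)) : ∀ (L : PySem.Set String) (y : String), y ∈ L →
      y ∈ l.foldl (pvRoundStep g t v) L := by
  induction l with
  | nil => intro L y hy; exact hy
  | cons kv l ih =>
    intro L y hy
    exact ih _ _ (pvRoundStep_grow g t v L kv y hy)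

theorem pvRoundStep_sound (g : List (String × List String)) (t : String) (v : PySem.Set String)
    (L : PySem.Set String) (kv : String × List String)
    (hL : ∀ x ∈ L, x ∉ v ∧ pvGoodP g t v.toFinset x) :
    ∀ x ∈ pvRoundStep g t v L kv, x ∉ v ∧ pvGoodP g t v.toFinset x := by
  intro x hx
  unfold pvRoundStep at hx
  split_ifs at hx with h1 h2
  · exact hL x hx
  · rcases (PySem.Set.mem_add _ _ _).1 hx with hxl | heq
    · exact hL x hxl
    · have hkv : kv.1 ∉ v := by
        intro hxv
        exact h1 (by rw [(PySem.Set.contains_iff v kv.1).2 hxv]; simp)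
      have hkvf : kv.1 ∉ v.toFinset := fun hh => hkv (List.mem_toFinset.1 hh)
      subst heq
      rcases List.any_eq_true.1 h2 with ⟨p, hp, hq⟩
      rcases hfs : pvFirst? p with _ | c
      · rw [pvQual_none hfs] at hq; cases hq
      · rw [pvQual_some hfs] at hq
        by_cases h1' : String.ofList [c] = t
        · exact ⟨hkv, pvGoodP.found _ _ hkvf ⟨p, hp, c, hfs, h1'⟩⟩
        · have hq2 : PySem.Chars.isupper c = true ∧
              PySem.Set.contains L (String.ofList [c]) = true := by
            rw [Bool.or_eq_true] at hq
            rcases hq with hb | hb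
            · exact absurd (by simpa using hb) h1'
            · rw [Bool.and_eq_true] at hb
              exact hb
          have hfl := hL _ ((PySem.Set.contains_iff _ _).1 hq2.2)
          exact ⟨hkv, pvGoodP.step _ _ _ hkvf ⟨p, hp, c, hfs, rfl, hq2.1, h1'⟩ hfl.2⟩
  · exact hL x hx

theorem pvRound_sound (g : List (String × List String)) (t : String) (v : PySem.Set String)
    (l : List (String × List String)) :
    ∀ (L : PySem.Set String), (∀ x ∈ L, x ∉ v ∧ pvGoodP g t v.toFinset x) →
      ∀ x ∈ l.foldl (pvRoundStep g t v) L, x ∉ v ∧ pvGoodP g t v.toFinset x := by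
  induction l with
  | nil => intro L hL x hx; exact hL x hx
  | cons kv l ih =>
    intro L hL x hx
    exact ih _ (pvRoundStep_sound g t v L kv hL) x hx

theorem pvRound_hit (g : List (String × List String)) (t : String) (v : PySem.Set String)
    {x : String} {ps : List String} (l : List (String × List String)) :
    ∀ (L L' : PySem.Set String), (∀ y, y ∈ L → y ∈ L') → (x, ps) ∈ l → x ∉ v →
      (∃ p ∈ (PySem.Dict.mk g).getD x [], pvQual t L p = true) →
      x ∈ l.foldl (pvRoundStep g t v) L' := by
  induction l with
  | nil => intro L L' _ hmem _ _; cases hmem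
  | cons kv l ih =>
    intro L L' hsub hmem hxv hqual
    rcases List.mem_cons.1 hmem with heq | hmem'
    · have hkx : kv.1 = x := by rw [← heq]
      simp only [List.foldl_cons]
      by_cases hL'x : x ∈ L'
      · exact pvFold_grow g t v l _ x (pvRoundStep_grow g t v L' kv x hL'x)
      · have hstep : x ∈ pvRoundStep g t v L' kv := by
          unfold pvRoundStep
          rw [hkx]
          rw [pv_contains_eq_false hL'x, pv_contains_eq_false hxv]
          simp only [Bool.or_self]
          rcases hqual with ⟨p, hp, hq⟩
          rw [if_pos (List.any_eq_true.2 ⟨p, hp, pvQual_mono t hsub hq⟩)]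
          exact (PySem.Set.mem_add _ _ _).2 (Or.inr rfl)
        exact pvFold_grow g t v l _ x hstep
    · exact ih _ _ (fun y hy => pvRoundStep_grow g t v L' kv y (hsub y hy)) hmem' hxv hqual

theorem pvRk_mono (g : List (String × List String)) (t : String) (v : PySem.Set String)
    {j j' : Nat} (h : j ≤ j') : ∀ x ∈ pvRk g t v j, x ∈ pvRk g t v j' := by
  induction h with
  | refl => intro x hx; exact hx
  | step h ih =>
    intro x hx
    exact pvFold_grow g t v g _ x (ih x hx)

theorem pvRk_sound (g : List (String × List String)) (t : String) (v : PySem.Set String) (j : Nat) :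
    ∀ x ∈ pvRk g t v j, x ∉ v ∧ pvGoodP g t v.toFinset x := by
  induction j with
  | zero => intro x hx; cases hx
  | succ j ih => exact pvRound_sound g t v g _ ih

theorem pv_complete (g : List (String × List String)) (t : String) (v : PySem.Set String) :
    ∀ (v' : Finset String) (n : String), pvGoodA g t v' n → v.toFinset ⊆ v' →
      n ∈ pvRk g t v (((g.map Prod.fst).toFinset \ v').card + 1) := by
  intro v' n h
  induction h with
  | found w m hmw hs =>
    intro hsub
    rcases hs with ⟨p, hp, c, hc, hct⟩
    rcases pv_getD_pair g hp with ⟨l, hlg, hpl⟩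
    have hmv : m ∉ v := fun hmv => hmw (hsub (List.mem_toFinset.2 hmv))
    exact pvRound_hit g t v g _ _ (fun y hy => hy) hlg hmv
      ⟨p, hp, by rw [pvQual_some hc]; simp [hct]⟩
  | step w m f hmw he hgf ih =>
    intro hsub
    have ih' := ih (hsub.trans (Finset.subset_insert _ _))
    rcases he with ⟨p, hp, c, hc, hcf, hu, hft⟩
    rcases pv_getD_pair g hp with ⟨l, hlg, hpl⟩
    have hmK : m ∈ (g.map Prod.fst).toFinset := by
      simp only [List.mem_toFinset, List.mem_map]
      exact ⟨(m, l), hlg, rfl⟩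
    have hmKw : m ∈ (g.map Prod.fst).toFinset \ w := Finset.mem_sdiff.2 ⟨hmK, hmw⟩
    have hcard : ((g.map Prod.fst).toFinset \ insert m w).card + 1 =
        ((g.map Prod.fst).toFinset \ w).card := by
      rw [Finset.sdiff_insert]
      rw [Finset.card_erase_of_mem hmKw]
      have := Finset.card_pos.2 ⟨m, hmKw⟩
      omega
    rw [hcard] at ih'
    have hmv : m ∉ v := fun hmv => hmw (hsub (List.mem_toFinset.2 hmv))
    refine pvRound_hit g t v g _ _ (fun y hy => hy) hlg hmv ⟨p, hp, ?_⟩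
    rw [pvQual_some hc, hu, (PySem.Set.contains_iff _ _).2 (by rw [hcf]; exact ih')]
    simp

theorem pvAlt_iff (current target : String) (grammar : List (String × List String))
    (v : PySem.Set String) :
    (let lead := pvSat grammar target v grammar.length PySem.Set.empty
     if PySem.Set.contains v current then false
     else ((PySem.Dict.mk grammar).getD current []).any (pvQual target lead)) = true ↔
      pvGoodP grammar target v.toFinset current := by
  simp only [pvSat_empty_eq_rk]
  by_cases hcv : current ∈ v
  · rw [if_pos ((PySem.Set.contains_iff v current).2 hcv)]
    simp only [Bool.false_eq_true, false_iff]
    intro h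
    cases h with
    | found _ h1 _ => exact h1 (List.mem_toFinset.2 hcv)
    | step _ _ h1 _ _ => exact h1 (List.mem_toFinset.2 hcv)
  · have hcf : current ∉ v.toFinset := fun h => hcv (List.mem_toFinset.1 h)
    rw [pv_contains_eq_false hcv]
    simp only [Bool.false_eq_true, if_false]
    constructor
    · intro h
      rcases List.any_eq_true.1 h with ⟨p, hp, hq⟩
      rcases hfs : pvFirst? p with _ | c
      · rw [pvQual_none hfs] at hq; cases hq
      · rw [pvQual_some hfs] at hq
        by_cases h1 : String.ofList [c] = target
        · exact pvGoodP.found _ _ hcf ⟨p, hp, c, hfs, h1⟩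
        · have hq2 : PySem.Chars.isupper c = true ∧
              PySem.Set.contains (pvRk grammar target v grammar.length)
                (String.ofList [c]) = true := by
            rw [Bool.or_eq_true] at hq
            rcases hq with hb | hb
            · exact absurd (by simpa using hb) h1
            · rw [Bool.and_eq_true] at hb
              exact hb
          have hfl := pvRk_sound grammar target v grammar.length _
            ((PySem.Set.contains_iff _ _).1 hq2.2)
          exact pvGoodP.step _ _ _ hcf ⟨p, hp, c, hfs, rfl, hq2.1, h1⟩ hfl.2
    · intro h
      have hA := pvGoodP_to_goodA grammar target _ _ h
      cases hA with
      | found _ _ h1 h2 =>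
        rcases h2 with ⟨p, hp, c, hc, hct⟩
        exact List.any_eq_true.2 ⟨p, hp, by rw [pvQual_some hc]; simp [hct]⟩
      | step _ _ f h1 h2 h3 =>
        have hcomp := pv_complete grammar target v _ _ h3
          (Finset.subset_insert _ _)
        rcases h2 with ⟨p, hp, c, hc, hcf2, hu, hft⟩
        rcases pv_getD_pair grammar hp with ⟨l, hlg, _⟩
        have hcK : current ∈ (grammar.map Prod.fst).toFinset := by
          simp only [List.mem_toFinset, List.mem_map]
          exact ⟨(current, l), hlg, rfl⟩
        have hcKw : current ∈ (grammar.map Prod.fst).toFinset \ v.toFinset :=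
          Finset.mem_sdiff.2 ⟨hcK, hcf⟩
        have hcard : ((grammar.map Prod.fst).toFinset \ insert current v.toFinset).card + 1 =
            ((grammar.map Prod.fst).toFinset \ v.toFinset).card := by
          rw [Finset.sdiff_insert]
          rw [Finset.card_erase_of_mem hcKw]
          have := Finset.card_pos.2 ⟨current, hcKw⟩
          omega
        rw [hcard] at hcomp
        have hle : ((grammar.map Prod.fst).toFinset \ v.toFinset).card ≤ grammar.length := by
          calc ((grammar.map Prod.fst).toFinset \ v.toFinset).card
              ≤ (grammar.map Prod.fst).toFinset.card :=
                Finset.card_le_card (Finset.sdiff_subset)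
            _ ≤ (grammar.map Prod.fst).length := List.toFinset_card_le _
            _ = grammar.length := List.length_map ..
        have hf_lead : f ∈ pvRk grammar target v grammar.length :=
          pvRk_mono grammar target v hle _ hcomp
        refine List.any_eq_true.2 ⟨p, hp, ?_⟩
        rw [pvQual_some hc, hu, (PySem.Set.contains_iff _ _).2 (by rw [hcf2]; exact hf_lead)]
        simp

-- ===== VERDICT (by name: the statement is the Claim_ definition above) =====
theorem pv_ports_agree (current target : String) (grammar : List (String × List String))
    (v : PySem.Set String) :
    pvLeadsA grammar target current v =
      (if PySem.Set.contains v current then false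
       else ((PySem.Dict.mk grammar).getD current []).any (pvQual target
         (pvSat grammar target v grammar.length PySem.Set.empty))) := by
  have h1 := pvLeadsA_iff_goodA grammar target current v
  have h2 := pvAlt_iff current target grammar v
  have hiff : pvLeadsA grammar target current v = true ↔
      (if PySem.Set.contains v current then false
       else ((PySem.Dict.mk grammar).getD current []).any (pvQual target
         (pvSat grammar target v grammar.length PySem.Set.empty))) = true :=
    h1.trans ((Iff.intro (pvGoodA_to_goodP grammar target)
      (pvGoodP_to_goodA grammar target _ _)).trans h2.symm)
  cases hx : pvLeadsA grammar target current v with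
  | false =>
    cases hy : (if PySem.Set.contains v current then false
       else ((PySem.Dict.mk grammar).getD current []).any (pvQual target
         (pvSat grammar target v grammar.length PySem.Set.empty))) with
    | false => rfl
    | true =>
      have := hiff.2 hy
      rw [hx] at this
      cases this
  | true => exact (hiff.1 hx).symm

theorem leads_leftmost_to_A_spec : Claim_equal_leads_leftmost_to_A := by
  intro current target grammar visited _
  unfold Spec_leads_leftmost_to_A leads_leftmost_to_A leads_leftmost_to_A_alt
  cases visited with
  | none => exact pv_ports_agree current target grammar PySem.Set.empty
  | some l => exact pv_ports_agree current target grammar (PySem.Set.ofList l)
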